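-- pv_equiv track=rewrite | github.com/VedangW/lm_metaphors | generate_few_shot.py | generate_in_context_prompt
-- ===== SOURCE A (Python) =====
-- def generate_in_context_prompt(target, data):
--     for i in range(len(data)):
--         prompt = ""
--         for j in range(len(data)):
--             if i != j:
--                 source, target_word, source_word, _ = data[j]
--                 prompt += f"If '{target}' is like '{source}', then '{target_word}' is like '{source_word}'. "
--
--         prompt += f"If '{target}' is like '{data[i][0]}', then '{data[i][1]}' is like what? Answer in one word."
--
--         yield prompt, data[i][2], data[i][3]
-- ===== SOURCE B (Python) =====
-- def generate_in_context_prompt(target, data):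
--     # Concatenate all analogy sentences once into a single string, recording the
--     # character offset where each sentence starts; every leave-one-out prompt is
--     # then just two slices of that one string plus the query sentence.
--     full = ""
--     offsets = []
--     for source, target_word, source_word, _ in data:
--         offsets.append(len(full))
--         full += f"If '{target}' is like '{source}', then '{target_word}' is like '{source_word}'. "
--     offsets.append(len(full))
--     for i, (source, target_word, source_word, answer) in enumerate(data):
--         prompt = (full[:offsets[i]] + full[offsets[i + 1]:]
--                   + f"If '{target}' is like '{source}', then '{target_word}' is like what? Answer in one word.")
--         yield prompt, source_word, answer
-- ===== Notes on version B (the rewrite author's own statement) =====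
-- stated objective: alternative
-- what changed: B concatenates all analogy sentences once into a single string while recording character offsets, then forms each leave-one-out prompt by string-slicing that one buffer at the recorded offsets, instead of A's nested loop that re-formats and re-concatenates every other row for each prompt.
import Mathlib
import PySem

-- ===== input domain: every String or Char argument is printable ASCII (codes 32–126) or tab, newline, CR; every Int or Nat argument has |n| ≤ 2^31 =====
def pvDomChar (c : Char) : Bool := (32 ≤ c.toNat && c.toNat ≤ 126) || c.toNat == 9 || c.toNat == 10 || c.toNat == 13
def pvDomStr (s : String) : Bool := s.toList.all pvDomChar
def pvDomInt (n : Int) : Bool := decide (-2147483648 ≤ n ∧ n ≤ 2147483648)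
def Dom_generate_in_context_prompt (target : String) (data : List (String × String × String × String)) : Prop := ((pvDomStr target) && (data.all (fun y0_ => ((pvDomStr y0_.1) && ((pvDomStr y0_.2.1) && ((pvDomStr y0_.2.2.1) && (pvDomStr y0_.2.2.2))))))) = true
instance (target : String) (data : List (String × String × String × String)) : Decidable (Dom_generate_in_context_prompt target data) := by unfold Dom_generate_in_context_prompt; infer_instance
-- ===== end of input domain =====

-- B concatenates all analogy sentences once into one buffer with recorded character offsets and
-- forms each leave-one-out prompt by slicing that buffer, replacing A's nested re-formatting loop;
-- return-value equivalence (both Pythons are generators, read as their yielded sequences).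

-- ===== PORT A =====
def generate_in_context_prompt (target : String) (data : List (String × String × String × String)) : List (String × String × String) :=
  (PySem.List.pyRange 0 data.length 1).foldl (fun acc i =>
    let prompt : String :=
      (PySem.List.pyRange 0 data.length 1).foldl (fun p j =>
        if i ≠ j then
          let e := PySem.List.pyGetD data j ("", "", "", "")
          p ++ "If '" ++ target ++ "' is like '" ++ e.1 ++ "', then '" ++ e.2.1 ++ "' is like '" ++ e.2.2.1 ++ "'. "
        else p) ""
    let ei := PySem.List.pyGetD data i ("", "", "", "")
    let prompt := prompt ++ "If '" ++ target ++ "' is like '" ++ ei.1 ++ "', then '" ++ ei.2.1 ++ "' is like what? Answer in one word."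
    acc ++ [(prompt, ei.2.2.1, ei.2.2.2)]) []

-- ===== PORT B =====
-- the formatted analogy sentence (the f-string appended to `full` in Source B's first loop)
def pvSeg (target : String) (e : String × String × String × String) : String :=
  "If '" ++ target ++ "' is like '" ++ e.1 ++ "', then '" ++ e.2.1 ++ "' is like '" ++ e.2.2.1 ++ "'. "

def generate_in_context_prompt_alt (target : String) (data : List (String × String × String × String)) : List (String × String × String) :=
  -- first loop: build the single buffer `full` and the list of start offsets
  let st := data.foldl (fun (s : String × List Int) e =>
    (s.1 ++ pvSeg target e, s.2 ++ [PySem.Str.len s.1])) ("", [])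
  let full := st.1
  let offsets := st.2 ++ [PySem.Str.len full]
  -- second loop: each prompt is two slices of `full` plus the query sentence
  (PySem.List.enumerate data).map (fun ie =>
    let i := ie.1
    let e := ie.2
    let prompt := PySem.Str.slice full none (some (PySem.List.pyGetD offsets i 0))
      ++ PySem.Str.slice full (some (PySem.List.pyGetD offsets (i + 1) 0)) none
      ++ "If '" ++ target ++ "' is like '" ++ e.1 ++ "', then '" ++ e.2.1 ++ "' is like what? Answer in one word."
    (prompt, e.2.2.1, e.2.2.2))

-- ===== PRECONDITION & SPEC =====
def Spec_generate_in_context_prompt (target : String) (data : List (String × String × String × String)) (out : List (String × String × String)) : Prop := out = generate_in_context_prompt_alt target data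
instance (target : String) (data : List (String × String × String × String)) (out : List (String × String × String)) : Decidable (Spec_generate_in_context_prompt target data out) := by unfold Spec_generate_in_context_prompt; infer_instance

-- ===== CLAIM (what is proved, stated in full; the proofs are below) =====
def Claim_equal_generate_in_context_prompt : Prop := ∀ (target : String) (data : List (String × String × String × String)), Dom_generate_in_context_prompt target data → Spec_generate_in_context_prompt target data (generate_in_context_prompt target data)

-- ===== LEMMAS AND PROOFS =====

-- concatenation of a list of strings (common normal form of both sides)
def pvCat (l : List String) : String := l.foldr (· ++ ·) ""

theorem pvCat_cons (x : String) (l : List String) : pvCat (x :: l) = x ++ pvCat l := rfl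

theorem pvCat_append (l1 l2 : List String) : pvCat (l1 ++ l2) = pvCat l1 ++ pvCat l2 := by
  induction l1 with
  | nil => simp [pvCat]
  | cons x t ih => simp [pvCat, List.foldr] at ih ⊢; rw [ih, String.append_assoc]

theorem foldl_snoc_eq_map {α β : Type} (g : α → β) (l : List α) (a : List β) :
    l.foldl (fun acc i => acc ++ [g i]) a = a ++ l.map g := by
  induction l generalizing a with
  | nil => simp
  | cons x t ih => simp [List.foldl, ih]

theorem enumerate_map_eq_range {α β : Type} (d : α) (f : Int × α → β) (xs : List α) (s : Int) :
    (PySem.List.enumerate xs s).map f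
      = (List.range xs.length).map (fun (k : Nat) => f (s + (k : Int), xs.getD k d)) := by
  induction xs generalizing s with
  | nil => simp [PySem.List.enumerate]
  | cons x t ih =>
      rw [PySem.List.enumerate_cons]
      simp only [List.map_cons, List.length_cons, List.range_succ_eq_map, List.map_map]
      rw [ih]
      refine congrArg₂ _ (by simp) ?_
      apply List.map_congr_left; intro k _
      simp [Function.comp]
      ring_nf

theorem pyRange_zero_foldl {β : Type} (n : Nat) (f : β → Int → β) (a : β) :
    (PySem.List.pyRange 0 n 1).foldl f a = (List.range n).foldl (fun (p : β) (k : Nat) => f p (k : Int)) a := by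
  rw [PySem.List.pyRange_one]
  rw [List.foldl_map]
  simp

theorem foldl_append_nat_eq_pvCat (h : Nat → String) (l : List Nat) (a : String) :
    l.foldl (fun p j => p ++ h j) a = a ++ pvCat (l.map h) := by
  induction l generalizing a with
  | nil => simp [pvCat]
  | cons x t ih => simp [List.foldl, ih, pvCat, String.append_assoc]

theorem range_map_ite (g : Nat → String) (k n : Nat) (hk : k < n) :
    (List.range n).map (fun j => if k = j then "" else g j)
      = ((List.range n).map g).take k ++ [""] ++ ((List.range n).map g).drop (k + 1) := by
  apply List.ext_getElem
  · simp; omega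
  · intro j hj hj'
    simp only [List.length_map, List.length_range] at hj
    simp only [List.getElem_map, List.getElem_range]
    simp only [List.getElem_append, List.length_append, List.length_take, List.length_map,
      List.length_range, List.length_cons, List.length_nil]
    have hmin : min k n = k := by omega
    simp only [hmin]
    by_cases hkj : k = j
    · subst hkj
      rw [if_pos rfl]
      split_ifs with h1 h2
      · omega
      · simp
      · omega
    · rw [if_neg hkj]
      split_ifs with h1 h2
      · simp [List.getElem_take]
      · omega
      · simp only [List.getElem_drop, List.getElem_map, List.getElem_range]
        congr 1
        omega

theorem getD_range_map {α : Type} (xs : List α) (d : α) :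
    (List.range xs.length).map (fun j => xs.getD j d) = xs := by
  apply List.ext_getElem
  · simp
  · intro j hj hj'
    simp [List.getD_eq_getElem?_getD, hj']

-- characterization of B's first loop: the buffer is the concatenation of the
-- sentences, and the recorded offsets are the prefix character lengths
theorem fold_state (target : String) (data : List (String × String × String × String))
    (f0 : String) (os : List Int) :
    data.foldl (fun (s : String × List Int) e =>
      (s.1 ++ pvSeg target e, s.2 ++ [PySem.Str.len s.1])) (f0, os)
    = (f0 ++ pvCat (data.map (pvSeg target)),
       os ++ (List.range data.length).map
         (fun k => (((f0 ++ pvCat ((data.map (pvSeg target)).take k)).toList.length : Int)))) := by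
  induction data generalizing f0 os with
  | nil => simp [pvCat]
  | cons e t ih =>
    simp only [List.foldl_cons, List.map_cons, List.length_cons]
    rw [ih]
    simp only [Prod.mk.injEq]
    constructor
    · rw [pvCat_cons, ← String.append_assoc]
    · rw [List.range_succ_eq_map, List.map_cons, List.map_map, List.append_assoc]
      congr 1
      simp only [List.take_zero, List.singleton_append]
      congr 1
      · simp [PySem.Str.len, pvCat]
      · apply List.map_congr_left
        intro k _
        simp only [Function.comp, List.take_succ_cons]
        congr 2
        rw [pvCat_cons, ← String.append_assoc]

theorem toList_pvCat_append (l1 l2 : List String) :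
    (pvCat (l1 ++ l2)).toList = (pvCat l1).toList ++ (pvCat l2).toList := by
  rw [pvCat_append]; simp

-- slicing the full buffer at the prefix length gives the prefix / the suffix
theorem slice_pvCat_prefix (segs : List String) (k : Nat) :
    PySem.Str.slice (pvCat segs) none (some ((pvCat (segs.take k)).toList.length : Int))
      = pvCat (segs.take k) := by
  have h : (PySem.Str.slice (pvCat segs) none (some ((pvCat (segs.take k)).toList.length : Int))).toList
      = (pvCat (segs.take k)).toList := by
    simp only [PySem.Str.toList_slice, PySem.Chars.slice_eq_listSlice, PySem.List.slice_to_natCast]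
    have hfull : (pvCat segs).toList = (pvCat (segs.take k)).toList ++ (pvCat (segs.drop k)).toList := by
      conv_lhs => rw [← List.take_append_drop k segs]
      rw [toList_pvCat_append]
    rw [hfull, List.take_left]
  calc PySem.Str.slice (pvCat segs) none (some ((pvCat (segs.take k)).toList.length : Int))
      = String.ofList (PySem.Str.slice (pvCat segs) none (some ((pvCat (segs.take k)).toList.length : Int))).toList := by
        rw [String.ofList_toList]
    _ = pvCat (segs.take k) := by rw [h, String.ofList_toList]

theorem slice_pvCat_suffix (segs : List String) (k : Nat) :
    PySem.Str.slice (pvCat segs) (some ((pvCat (segs.take k)).toList.length : Int)) none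
      = pvCat (segs.drop k) := by
  have h : (PySem.Str.slice (pvCat segs) (some ((pvCat (segs.take k)).toList.length : Int)) none).toList
      = (pvCat (segs.drop k)).toList := by
    simp only [PySem.Str.toList_slice, PySem.Chars.slice_eq_listSlice, PySem.List.slice_from_natCast]
    have hfull : (pvCat segs).toList = (pvCat (segs.take k)).toList ++ (pvCat (segs.drop k)).toList := by
      conv_lhs => rw [← List.take_append_drop k segs]
      rw [toList_pvCat_append]
    rw [hfull, List.drop_left]
  calc PySem.Str.slice (pvCat segs) (some ((pvCat (segs.take k)).toList.length : Int)) none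
      = String.ofList (PySem.Str.slice (pvCat segs) (some ((pvCat (segs.take k)).toList.length : Int)) none).toList := by
        rw [String.ofList_toList]
    _ = pvCat (segs.drop k) := by rw [h, String.ofList_toList]

-- offsets[k] for k ≤ n, where offsets = (prefix lengths for k < n) ++ [full length]
theorem getD_offsets (f : Nat → Int) (n k : Nat) (hk : k ≤ n) :
    (((List.range n).map f) ++ [f n]).getD k 0 = f k := by
  rcases lt_or_eq_of_le hk with h | h
  · rw [List.getD_eq_getElem?_getD, List.getElem?_append_left (by simpa using h)]
    simp [h]
  · subst h
    rw [List.getD_eq_getElem?_getD, List.getElem?_append_right (by simp)]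
    simp

-- ===== VERDICT (by name: the statement is the Claim_ definition above) =====
theorem generate_in_context_prompt_spec : Claim_equal_generate_in_context_prompt := by
  intro target data _
  unfold Spec_generate_in_context_prompt
  unfold generate_in_context_prompt generate_in_context_prompt_alt
  rw [fold_state]
  simp only [String.empty_append, List.nil_append]
  rw [enumerate_map_eq_range ("", "", "", "")]
  simp only [zero_add]
  rw [pyRange_zero_foldl]
  rw [foldl_snoc_eq_map]
  rw [List.nil_append]
  apply List.map_congr_left
  intro k hk
  rw [List.mem_range] at hk
  simp only [PySem.List.pyGetD_natCast]
  -- inner loop of A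
  rw [pyRange_zero_foldl]
  have hstep : (fun (p : String) (j : Nat) =>
      if (k : Int) ≠ (j : Int) then
        let e := PySem.List.pyGetD data (j : Int) ("", "", "", "")
        p ++ "If '" ++ target ++ "' is like '" ++ e.1 ++ "', then '" ++ e.2.1 ++ "' is like '" ++ e.2.2.1 ++ "'. "
      else p)
      = fun (p : String) (j : Nat) => p ++ (if k = j then "" else pvSeg target (data.getD j ("", "", "", ""))) := by
    funext p j
    by_cases h : k = j
    · simp [h]
    · have : (k : Int) ≠ (j : Int) := by exact_mod_cast h
      simp [h, this, PySem.List.pyGetD_natCast, pvSeg, String.append_assoc]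
  rw [hstep, foldl_append_nat_eq_pvCat, String.empty_append]
  rw [range_map_ite _ k data.length hk]
  have hsegs : (List.range data.length).map (fun j => pvSeg target (data.getD j ("", "", "", "")))
      = data.map (pvSeg target) := by
    have := getD_range_map data ("", "", "", "")
    calc (List.range data.length).map (fun j => pvSeg target (data.getD j ("", "", "", "")))
        = ((List.range data.length).map (fun j => data.getD j ("", "", "", ""))).map (pvSeg target) := by
          rw [List.map_map]; rfl
      _ = data.map (pvSeg target) := by rw [this]
  rw [hsegs]
  -- B side: offset lookups, then slices become the prefix / suffix concatenations
  have hlm : data.length = (data.map (pvSeg target)).length := by simp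
  have hlen : PySem.Str.len (pvCat (data.map (pvSeg target)))
      = (((pvCat ((data.map (pvSeg target)).take (data.map (pvSeg target)).length)).toList.length : Int)) := by
    rw [List.take_length]
    simp [PySem.Str.len]
  rw [hlen]
  have hcast : ((k : Int) + 1) = (((k + 1 : Nat) : Int)) := by push_cast; ring
  rw [hcast]
  simp only [PySem.List.pyGetD_natCast]
  rw [hlm, getD_offsets _ _ k (by omega), getD_offsets _ _ (k + 1) (by omega)]
  rw [slice_pvCat_prefix, slice_pvCat_suffix]
  rw [pvCat_append, pvCat_append]
  simp [pvCat, String.append_assoc]
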